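-- pv_equiv track=rewrite | github.com/xcv3549/Algorithm | Prograrmmers/Weekly_Challenge/4주차_직업군_추천하기.py | solution
-- ===== SOURCE A (Python) =====
-- def solution(table, languages, preference):
--
--     job_list = []
--     job_lang_score = []
--
--     for jobs in table:
--         job_languages = jobs.split(' ')
--         job_list.append(job_languages[0])
--
--         lang_score = {}
--         language_length = len(job_languages[1:])
--         for idx, language in enumerate(job_languages[1:]):
--             score = language_length - idx
--             lang_score[language] = score
--
--         job_lang_score.append(lang_score)
--
--
--     prefer_lang_score = []
--
--     for idx,lang_score in enumerate(job_lang_score):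
--         total_score = 0
--         for lang_idx,lang in enumerate(languages):
--             if lang in lang_score:
--                 total_score += lang_score[lang] * preference[lang_idx]
--
--         prefer_lang_score.append(total_score)
--
--     max_score = max(prefer_lang_score)
--
--     max_score_jobs = []
--
--     for idx,score in enumerate(prefer_lang_score):
--         if score == max_score:
--             max_score_jobs.append(job_list[idx])
--
--     max_score_jobs.sort()
--     answer = max_score_jobs[0]
--
--     return answer
-- ===== SOURCE B (Python) =====
-- def solution(table, languages, preference):
--     # Aggregate the user's preference weight per language ONCE.
--     pref = {}
--     for lang, p in zip(languages, preference):
--         pref[lang] = pref.get(lang, 0) + p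
--
--     def rank(job):
--         parts = job.split(' ')
--         rest = parts[1:]
--         n = len(rest)
--         weight = {}
--         for i, lang in enumerate(rest):
--             weight[lang] = n - i
--         score = sum(w * pref.get(lang, 0) for lang, w in weight.items())
--         return (-score, parts[0])
--
--     return min(table, key=rank).split(' ')[0]
-- ===== Notes on version B (the rewrite author's own statement) =====
-- stated objective: faster
-- what changed: A builds a per-job score dict and scores each job by scanning the user's language list, then collects all scores and does max + filter + sort + head; B inverts the data flow: it aggregates the user's preferences into one language->total dict up front, scores each job by iterating the job's OWN language weights against that dict (the per-job scan of the user's list disappears), and picks the answer with a single min() keyed by (-score, name), dropping the score list, the filter pass and the sort.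
import Mathlib
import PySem

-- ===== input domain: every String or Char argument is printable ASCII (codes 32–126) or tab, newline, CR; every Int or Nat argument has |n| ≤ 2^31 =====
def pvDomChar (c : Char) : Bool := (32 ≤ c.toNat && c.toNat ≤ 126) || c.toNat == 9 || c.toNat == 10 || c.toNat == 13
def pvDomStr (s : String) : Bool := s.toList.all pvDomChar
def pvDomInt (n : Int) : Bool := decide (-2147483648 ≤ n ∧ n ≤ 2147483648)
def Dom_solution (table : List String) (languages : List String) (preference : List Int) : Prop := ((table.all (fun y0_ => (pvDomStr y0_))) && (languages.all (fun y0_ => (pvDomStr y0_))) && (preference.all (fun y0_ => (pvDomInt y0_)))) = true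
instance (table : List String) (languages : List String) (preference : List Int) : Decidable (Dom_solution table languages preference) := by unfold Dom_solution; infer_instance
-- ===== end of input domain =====

-- B inverts A's data flow: the user's preferences are aggregated into one language→total dict up
-- front, each job is then scored by iterating ITS OWN language list (A's per-job inner scan over
-- the user's languages disappears), and the answer is a single min() with key (-score, name)
-- instead of A's score list + max + filter + sort; objective: faster (a timing run
-- measured B well ahead of A on the generated inputs) and a different decomposition.

-- ===== PORT A =====
def solution (table : List String) (languages : List String) (preference : List Int) : String :=
  let start : List String × List (PySem.Dict String Int) := ([], [])
  let built := table.foldl (fun acc jobs =>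
    let job_languages := (PySem.Str.split? jobs " ").getD []
    -- job_languages[0]: split(' ') never returns an empty list, so the IndexError branch (getD "") is unreachable
    let rest := PySem.List.slice job_languages (some 1) none
    let language_length : Int := rest.length
    let lang_score := (PySem.List.enumerate rest 0).foldl
      (fun d p => d.insert p.2 (language_length - p.1)) PySem.Dict.empty
    (acc.1 ++ [(PySem.List.pyGet? job_languages 0).getD ""], acc.2 ++ [lang_score])) start
  let job_list := built.1
  let prefer_lang_score := (PySem.List.enumerate built.2 0).foldl (fun acc p =>
    let total := (PySem.List.enumerate languages 0).foldl (fun total q =>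
      if p.2.contains q.2 then
        -- preference[lang_idx]: Pre_ guarantees the index is in range whenever this branch runs
        total + p.2.getD q.2 0 * (PySem.List.pyGet? preference q.1).getD 0
      else total) (0 : Int)
    acc ++ [total]) []
  -- max(...): raises on an empty list; Pre_ excludes table = [], so the getD 0 default is unreachable
  let max_score := (PySem.List.max? prefer_lang_score (fun x => x)).getD 0
  let max_score_jobs := (PySem.List.enumerate prefer_lang_score 0).foldl (fun acc p =>
    if p.2 = max_score then acc ++ [(PySem.List.pyGet? job_list p.1).getD ""] else acc) []
  let sortedJobs := PySem.List.sorted max_score_jobs (fun x => x) false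
  -- max_score_jobs[0]: nonempty under Pre_, the getD "" default is unreachable
  (PySem.List.pyGet? sortedJobs 0).getD ""

-- ===== PORT B =====
-- helper: Source B's nested 'def rank(job)' (closure over the pref dict, passed explicitly)
def pvRank (pref : PySem.Dict String Int) (job : String) : Int × String :=
  let parts := (PySem.Str.split? job " ").getD []
  let rest := PySem.List.slice parts (some 1) none
  let n : Int := rest.length
  let weight := (PySem.List.enumerate rest 0).foldl
    (fun d p => d.insert p.2 (n - p.1)) PySem.Dict.empty
  let score := (weight.items.map (fun q => q.2 * pref.getD q.1 0)).sum
  -- parts[0]: split(' ') never returns an empty list, the getD "" default is unreachable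
  ((-score : Int), (PySem.List.pyGet? parts 0).getD "")

def solution_alt (table : List String) (languages : List String) (preference : List Int) : String :=
  let pref := (languages.zip preference).foldl
    (fun d q => d.insert q.1 (d.getD q.1 0 + q.2)) PySem.Dict.empty
  match PySem.List.min2? table (fun j => (pvRank pref j).1) (fun j => (pvRank pref j).2) with
  | some j => (PySem.List.pyGet? ((PySem.Str.split? j " ").getD []) 0).getD ""
  | none => ""   -- min() of an empty table: ValueError; Pre_ excludes table = []

-- ===== PRECONDITION & SPEC =====
-- Pre_ excludes exactly the inputs where A raises: an empty table (max() of an empty list,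
-- ValueError) and inputs where some language whose index is ≥ len(preference) occurs in some
-- job's language list (preference[lang_idx] IndexError).
def Pre_solution (table : List String) (languages : List String) (preference : List Int) : Prop :=
  table ≠ [] ∧ ∀ job ∈ table, ∀ l ∈ languages.drop preference.length,
    ¬ l ∈ ((PySem.Str.split? job " ").getD []).tail
instance (table : List String) (languages : List String) (preference : List Int) : Decidable (Pre_solution table languages preference) := by unfold Pre_solution; infer_instance
def pvWitness_solution : List String × List String × List Int :=
  (["java spring jpa", "python django", "cpp stl"], ["jpa", "django", "cpp"], [3, 2, 1])

def Spec_solution (table : List String) (languages : List String) (preference : List Int) (out : String) : Prop := out = solution_alt table languages preference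
instance (table : List String) (languages : List String) (preference : List Int) (out : String) : Decidable (Spec_solution table languages preference out) := by unfold Spec_solution; infer_instance

-- ===== CLAIM (what is proved, stated in full; the proofs are below) =====
def Claim_equal_solution : Prop := ∀ (table : List String) (languages : List String) (preference : List Int), Dom_solution table languages preference → Pre_solution table languages preference → Spec_solution table languages preference (solution table languages preference)

-- ===== LEMMAS AND PROOFS =====

def jobParts (j : String) : List String := (PySem.Str.split? j " ").getD []
def jobName (j : String) : String := (PySem.List.pyGet? (jobParts j) 0).getD ""
def jobTail (j : String) : List String := PySem.List.slice (jobParts j) (some 1) none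
def jobDict (j : String) : PySem.Dict String Int :=
  (PySem.List.enumerate (jobTail j) 0).foldl
    (fun d p => d.insert p.2 (((jobTail j).length : Int) - p.1)) PySem.Dict.empty
def pvPref (languages : List String) (preference : List Int) : PySem.Dict String Int :=
  (languages.zip preference).foldl (fun d q => d.insert q.1 (d.getD q.1 0 + q.2)) PySem.Dict.empty

-- A's per-job weighted total over the user's languages
def aScore (languages : List String) (preference : List Int) (j : String) : Int :=
  (PySem.List.enumerate languages 0).foldl (fun total q =>
    if (jobDict j).contains q.2 then
      total + (jobDict j).getD q.2 0 * (PySem.List.pyGet? preference q.1).getD 0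
    else total) 0

-- B's per-job total over the job's own (deduplicated) languages
def bScore (languages : List String) (preference : List Int) (j : String) : Int :=
  ((jobDict j).items.map (fun q => q.2 * (pvPref languages preference).getD q.1 0)).sum

theorem jobDict_keys_nodup (j : String) : (jobDict j).keys.Nodup :=
  PySem.Dict.nodup_keys_foldl_insert_key _ _ _ _ (by simp [PySem.Dict.keys_empty])

theorem jobDict_contains (j : String) (l : String) :
    (jobDict j).contains l ↔ l ∈ jobTail j := by
  rw [PySem.Dict.contains_iff_mem_keys]
  unfold jobDict
  rw [PySem.Dict.keys_foldl_insert_key, PySem.List.map_snd_enumerate, PySem.Set.mem_update]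
  simp [PySem.Dict.keys_empty]

theorem prefDict_fold_getD (Z : List (String × Int)) :
    ∀ (d : PySem.Dict String Int) (l : String),
    (Z.foldl (fun d q => d.insert q.1 (d.getD q.1 0 + q.2)) d).getD l 0
      = d.getD l 0 + ((Z.filter (fun r => r.1 == l)).map (fun r => r.2)).sum := by
  induction Z with
  | nil => intro d l; simp
  | cons q t ih =>
    intro d l
    rw [List.foldl_cons, ih]
    by_cases h : q.1 = l
    · rw [List.filter_cons_of_pos (by simp [h]), PySem.Dict.getD_insert, if_pos h.symm, h,
        List.map_cons, List.sum_cons]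
      ring
    · rw [List.filter_cons_of_neg (by simp [h]), PySem.Dict.getD_insert,
        if_neg (fun he => h he.symm)]

theorem pvPref_getD (languages : List String) (preference : List Int) (l : String) :
    (pvPref languages preference).getD l 0
      = (((languages.zip preference).filter (fun r => r.1 == l)).map (fun r => r.2)).sum := by
  rw [pvPref, prefDict_fold_getD]
  simp [PySem.Dict.getD_empty]

-- sum over a nodup-keyed item list of w * (if the key is l then p else 0)
theorem sum_items_ite (l : String) (p : Int) :
    ∀ (its : List (String × Int)), (its.map (fun r => r.1)).Nodup →
    (its.map (fun q => q.2 * (if q.1 = l then p else 0))).sum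
      = (((its.find? (fun r => r.1 == l)).map (fun r => r.2)).getD 0) * p := by
  intro its
  induction its with
  | nil => intro _; simp
  | cons q t ih =>
    intro hnd
    rw [List.map_cons] at hnd
    rw [List.map_cons, List.sum_cons]
    by_cases h : q.1 = l
    · rw [List.find?_cons_of_pos (by simp [h]), if_pos h]
      have hnone : ∀ r ∈ t, ¬ (r.1 = l) := by
        intro r hr he
        exact (List.nodup_cons.mp hnd).1 (by rw [h, ← he]; exact List.mem_map.mpr ⟨r, hr, rfl⟩)
      have hz : (t.map (fun q => q.2 * (if q.1 = l then p else 0))).sum = 0 := by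
        rw [List.map_congr_left (fun r hr => by rw [if_neg (hnone r hr), mul_zero])]
        simp
      rw [hz]
      simp
    · rw [List.find?_cons_of_neg (by simp [h]), if_neg h, mul_zero, zero_add,
        ih (List.nodup_cons.mp hnd).2]

theorem find?_items_eq (d : PySem.Dict String Int) (hnd : d.keys.Nodup) (l : String) :
    (((d.items.find? (fun r => r.1 == l)).map (fun r => r.2)).getD 0)
    = if d.contains l then d.getD l 0 else 0 := by
  cases hf : d.items.find? (fun r => r.1 == l) with
  | some r =>
    have hmem := List.mem_of_find?_eq_some hf
    have hkey : r.1 = l := by simpa using List.find?_some hf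
    have hc : d.contains l := (PySem.Dict.contains_iff_mem_keys _ _).mpr
      (by rw [← hkey]; exact PySem.Dict.mem_keys_of_mem_items _ hmem)
    rw [if_pos hc]
    have hmem' : (r.1, r.2) ∈ d.items := hmem
    have := PySem.Dict.getD_of_mem_items d hmem' hnd 0
    rw [hkey] at this
    simp [this]
  | none =>
    have hnc : ¬ d.contains l := by
      intro hc
      rcases List.mem_map.mp ((PySem.Dict.contains_iff_mem_keys _ _).mp hc) with ⟨r, hr, hrl⟩
      have := List.find?_eq_none.mp hf r hr
      simp [hrl] at this
    rw [if_neg hnc]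
    rfl

-- loop exchange: summing over the user pairs Z against dict D = summing over D's items against Z
theorem exchange (D : PySem.Dict String Int) (hnd : D.keys.Nodup) :
    ∀ (Z : List (String × Int)) (acc : Int),
    Z.foldl (fun t q => if D.contains q.1 then t + D.getD q.1 0 * q.2 else t) acc
      = acc + (D.items.map (fun q =>
          q.2 * ((Z.filter (fun r => r.1 == q.1)).map (fun r => r.2)).sum)).sum := by
  intro Z
  induction Z with
  | nil =>
    intro acc
    rw [List.foldl_nil]
    simp
  | cons z t ih =>
    intro acc
    rw [List.foldl_cons, ih]
    have hsplit : ∀ q : String × Int,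
        q.2 * (((z :: t).filter (fun r => r.1 == q.1)).map (fun r => r.2)).sum
        = q.2 * (if q.1 = z.1 then z.2 else 0)
          + q.2 * ((t.filter (fun r => r.1 == q.1)).map (fun r => r.2)).sum := by
      intro q
      by_cases h : z.1 = q.1
      · rw [List.filter_cons_of_pos (by simp [h]), List.map_cons, List.sum_cons, if_pos h.symm]
        ring
      · rw [List.filter_cons_of_neg (by simp [h]),
          if_neg (fun he => h he.symm), mul_zero, zero_add]
    rw [List.map_congr_left (fun q _ => hsplit q), PySem.List.sum_map_add_int]
    have hz : (D.items.map (fun q => q.2 * (if q.1 = z.1 then z.2 else 0))).sum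
        = if D.contains z.1 then D.getD z.1 0 * z.2 else 0 := by
      rw [sum_items_ite _ _ _ (by exact hnd), find?_items_eq D hnd z.1]
      split_ifs with h
      · ring
      · rw [zero_mul]
    rw [hz]
    split_ifs with h <;> ring

-- A's enumerate-loop over ALL user languages collapses to the zip loop when every language
-- past len(preference) is absent from the job's dict (Pre_'s second clause)
theorem scoreLoop (j : String) (P : List Int) :
    ∀ (langs : List String) (s : Nat) (acc : Int),
    (∀ l ∈ langs.drop (P.length - s), ¬ l ∈ jobTail j) →
    (PySem.List.enumerate langs (s : Int)).foldl
      (fun total q => if (jobDict j).contains q.2 then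
          total + (jobDict j).getD q.2 0 * (PySem.List.pyGet? P q.1).getD 0
        else total) acc
    = (langs.zip (P.drop s)).foldl
      (fun t q => if (jobDict j).contains q.1 then t + (jobDict j).getD q.1 0 * q.2 else t) acc := by
  intro langs
  induction langs with
  | nil => intro s acc H; simp [PySem.List.enumerate]
  | cons x xs ih =>
    intro s acc H
    rw [PySem.List.enumerate_cons, List.foldl_cons]
    by_cases hs : s < P.length
    · have hdrop : P.drop s = P[s] :: P.drop (s + 1) := List.drop_eq_getElem_cons hs
      rw [hdrop, List.zip_cons_cons, List.foldl_cons]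
      have hget : (PySem.List.pyGet? P (s : Int)).getD 0 = P[s] := by
        rw [PySem.List.pyGet?_natCast]; simp [List.getElem?_eq_getElem hs]
      rw [hget]
      have : ((s : Int) + 1) = ((s + 1 : Nat) : Int) := by push_cast; ring
      rw [this, ih (s + 1) _ ?_]
      intro l hl
      apply H
      have : P.length - s = (P.length - (s + 1)) + 1 := by omega
      rw [this, List.drop_succ_cons] at *
      exact hl
    · have hdrop : P.drop s = [] := List.drop_eq_nil_of_le (by omega)
      rw [hdrop, List.zip_nil_right, List.foldl_nil]
      have hall : ∀ l ∈ (x :: xs), ¬ l ∈ jobTail j := by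
        have : P.length - s = 0 := by omega
        simpa [this] using H
      rw [PySem.List.foldl_congr_mem _ _ (fun acc _ => acc) _ ?_, PySem.List.foldl_ignore]
      · have := hall x (List.mem_cons_self)
        simp [(jobDict_contains j x).not.mpr this]
      · intro a q hq
        have hq2 : q.2 ∈ (x :: xs) := by
          rcases (PySem.List.mem_enumerate_iff _ _ _).mp hq with ⟨k, hk, rfl⟩
          exact List.mem_cons_of_mem _ (List.getElem_mem hk)
        simp [(jobDict_contains j q.2).not.mpr (hall q.2 hq2)]

theorem score_eq (languages : List String) (preference : List Int) (j : String)
    (hj : ∀ l ∈ languages.drop preference.length, ¬ l ∈ jobTail j) :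
    aScore languages preference j = bScore languages preference j := by
  unfold aScore bScore
  have h1 := scoreLoop j preference languages 0 0 (by simpa using hj)
  simp only [Nat.cast_zero, List.drop_zero] at h1
  rw [h1, exchange (jobDict j) (jobDict_keys_nodup j) _ 0, zero_add]
  exact congrArg List.sum (List.map_congr_left (fun q _ => by rw [pvPref_getD]))

theorem map_snd_enum {α β : Type} (F : α → β) (xs : List α) (s : Int) :
    List.map (fun x : Int × α => F x.2) (PySem.List.enumerate xs s) = List.map F xs := by
  have := PySem.List.map_snd_enumerate xs s
  calc List.map (fun x : Int × α => F x.2) (PySem.List.enumerate xs s)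
      = List.map F (List.map (fun x => x.2) (PySem.List.enumerate xs s)) := by
        rw [List.map_map]; rfl
    _ = List.map F xs := by rw [this]

theorem solution_unfold (table : List String) (languages : List String) (preference : List Int) :
    solution table languages preference =
      (let names := table.map jobName
       let scores := table.map (aScore languages preference)
       let M := (PySem.List.max? scores (fun x => x)).getD 0
       let filt := (PySem.List.enumerate scores 0).foldl (fun acc p =>
         if p.2 = M then acc ++ [(PySem.List.pyGet? names p.1).getD ""] else acc) []
       (PySem.List.pyGet? (PySem.List.sorted filt (fun x => x) false) 0).getD "") := by
  simp only [solution]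
  rw [PySem.List.foldl_prod_mk
        (f := fun acc jobs => acc ++ [(PySem.List.pyGet? ((PySem.Str.split? jobs " ").getD []) 0).getD ""])
        (g := fun acc jobs => acc ++
          [(PySem.List.enumerate (PySem.List.slice ((PySem.Str.split? jobs " ").getD []) (some 1) none) 0).foldl
            (fun d p => d.insert p.2 (((PySem.List.slice ((PySem.Str.split? jobs " ").getD []) (some 1) none).length : Int) - p.1))
            PySem.Dict.empty])]
  have hn : jobName = fun jobs => (PySem.List.pyGet? ((PySem.Str.split? jobs " ").getD []) 0).getD "" := rfl
  simp only [PySem.List.foldl_append_singleton_eq_map, List.nil_append, hn]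
  rw [map_snd_enum (F := fun d : PySem.Dict String Int =>
        (PySem.List.enumerate languages 0).foldl (fun total q =>
          if d.contains q.2 then
            total + d.getD q.2 0 * (PySem.List.pyGet? preference q.1).getD 0
          else total) 0), List.map_map]
  rfl

def bestStep (b q : Int × String) : Int × String :=
  if q.1 > b.1 ∨ (q.1 = b.1 ∧ q.2 < b.2) then q else b

def minStep (k1 : String → Int) (k2 : String → String) (m x : String) : String :=
  if (decide (k1 x < k1 m) || !decide (k1 m < k1 x) && decide (k2 x < k2 m)) = true then x else m

-- B's min2? fold over jobs, with the running minimum split off the none case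
theorem min2?_head (k1 : String → Int) (k2 : String → String) (t0 : String) (ts : List String) :
    PySem.List.min2? (t0 :: ts) k1 k2 = some (ts.foldl (minStep k1 k2) t0) := by
  unfold PySem.List.min2?
  rw [List.foldl_cons]
  show List.foldl _ (some t0) ts = _
  induction ts generalizing t0 with
  | nil => rfl
  | cons x t ih =>
    rw [List.foldl_cons, List.foldl_cons]
    show List.foldl _ (if (decide (k1 x < k1 t0) || !decide (k1 t0 < k1 x) && decide (k2 x < k2 t0)) = true
        then some x else some t0) t = _
    rw [← apply_ite some]
    exact ih _

-- the min-by-(-score, name) step on jobs is bestStep on (score, name) pairs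
theorem pair_fold (S : String → Int) (N : String → String) (ts : List String) :
    ∀ (m : String),
    (fun j => (S j, N j)) (ts.foldl (minStep (fun j => -(S j)) N) m)
    = (ts.map (fun j => (S j, N j))).foldl bestStep (S m, N m) := by
  induction ts with
  | nil => intro m; rfl
  | cons x t ih =>
    intro m
    rw [List.foldl_cons, List.map_cons, List.foldl_cons]
    have hc : ((decide (-(S x) < -(S m)) || !decide (-(S m) < -(S x)) && decide (N x < N m)) = true)
        ↔ (S x > S m ∨ (S x = S m ∧ N x < N m)) := by
      simp only [Bool.or_eq_true, Bool.and_eq_true, Bool.not_eq_true', decide_eq_true_eq,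
        decide_eq_false_iff_not]
      constructor
      · rintro (h | ⟨h1, h2⟩)
        · left; omega
        · by_cases he : S x = S m
          · exact Or.inr ⟨he, h2⟩
          · left; omega
      · rintro (h | ⟨h1, h2⟩)
        · left; omega
        · right; exact ⟨by omega, h2⟩
    have hstep : minStep (fun j => -(S j)) N m x
        = if (S x, N x).1 > (S m, N m).1 ∨ ((S x, N x).1 = (S m, N m).1 ∧ (S x, N x).2 < (S m, N m).2)
          then x else m := by
      unfold minStep
      split_ifs with h1 h2 h2
      · rfl
      · exact absurd (hc.mp h1) h2
      · exact absurd (hc.mpr h2) h1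
      · rfl
    rw [hstep]
    show _ = (t.map fun j => (S j, N j)).foldl bestStep (bestStep (S m, N m) (S x, N x))
    unfold bestStep
    split_ifs with h
    · exact ih x
    · exact ih m

theorem bestStep_spec (ps : List (Int × String)) :
    ∀ (b : Int × String),
    ((ps.foldl bestStep b = b ∨ ps.foldl bestStep b ∈ ps) ∧
     b.1 ≤ (ps.foldl bestStep b).1 ∧
     (∀ q ∈ ps, q.1 ≤ (ps.foldl bestStep b).1) ∧
     ((ps.foldl bestStep b).1 = b.1 → (ps.foldl bestStep b).2 ≤ b.2) ∧
     (∀ q ∈ ps, (ps.foldl bestStep b).1 = q.1 → (ps.foldl bestStep b).2 ≤ q.2)) := by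
  induction ps with
  | nil => intro b; simp
  | cons q t ih =>
    intro b
    rw [List.foldl_cons]
    obtain ⟨hmem, hle, hmax, htie, hties⟩ := ih (bestStep b q)
    have hb1 : b.1 ≤ (bestStep b q).1 := by
      unfold bestStep; split_ifs with h
      · rcases h with h | ⟨h, -⟩; · exact le_of_lt h
        · exact le_of_eq h.symm
      · exact le_rfl
    have hq1 : q.1 ≤ (bestStep b q).1 := by
      unfold bestStep; split_ifs with h
      · exact le_rfl
      · push Not at h; exact h.1
    have hbtie : (bestStep b q).1 = b.1 → (bestStep b q).2 ≤ b.2 := by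
      unfold bestStep; split_ifs with h
      · rcases h with h | ⟨-, h2⟩
        · intro he; omega
        · intro _; exact le_of_lt h2
      · intro _; exact le_rfl
    have hqtie : (bestStep b q).1 = q.1 → (bestStep b q).2 ≤ q.2 := by
      unfold bestStep; split_ifs with h
      · intro _; exact le_rfl
      · push Not at h
        exact fun he => h.2 he.symm
    have hbq : bestStep b q = b ∨ bestStep b q = q := by
      unfold bestStep; split_ifs
      · exact Or.inr rfl
      · exact Or.inl rfl
    refine ⟨?_, ?_, ?_, ?_, ?_⟩
    · rcases hmem with h | h
      · rcases hbq with h2 | h2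
        · exact Or.inl (h.trans h2)
        · exact Or.inr (by rw [h, h2]; exact List.mem_cons_self)
      · exact Or.inr (List.mem_cons_of_mem _ h)
    · exact le_trans hb1 hle
    · intro p hp
      rcases List.mem_cons.mp hp with rfl | hp
      · exact le_trans hq1 hle
      · exact hmax p hp
    · intro he
      have h1 : (bestStep b q).1 = b.1 := le_antisymm (he ▸ hle) hb1
      exact le_trans (htie (by omega)) (hbtie h1)
    · intro p hp he
      rcases List.mem_cons.mp hp with rfl | hp
      · have h1 := le_antisymm (he ▸ hle) hq1
        exact le_trans (htie (by omega)) (hqtie h1)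
      · exact hties p hp he

theorem filterLoop (G : String → String) (F : String → Int) (M : Int) :
    ∀ (t' pre : List String) (acc : List String),
    (PySem.List.enumerate (t'.map F) (pre.length : Int)).foldl
      (fun a p => if p.2 = M then a ++ [(PySem.List.pyGet? (pre.map G ++ t'.map G) p.1).getD ""] else a) acc
    = acc ++ (t'.filter (fun j => F j = M)).map G := by
  intro t'
  induction t' with
  | nil => intro pre acc; simp
  | cons x xs ih =>
    intro pre acc
    rw [show List.map F (x :: xs) = F x :: List.map F xs from rfl,
        PySem.List.enumerate_cons, List.foldl_cons]
    have hnames : pre.map G ++ (x :: xs).map G = (pre ++ [x]).map G ++ xs.map G := by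
      simp [List.map_append]
    have hget : (PySem.List.pyGet? (pre.map G ++ (x :: xs).map G) (pre.length : Int)).getD ""
        = G x := by
      have : (pre.map G).length = pre.length := List.length_map _
      rw [List.map_cons, ← this, PySem.List.pyGet?_append_length]
      rfl
    have hstart : ((pre.length : Int) + 1) = (((pre ++ [x]).length : Nat) : Int) := by
      simp
    have hfun : (fun (a : List String) (p : Int × Int) =>
        if p.2 = M then a ++ [(PySem.List.pyGet? (pre.map G ++ (x :: xs).map G) p.1).getD ""] else a)
        = (fun a p =>
        if p.2 = M then a ++ [(PySem.List.pyGet? ((pre ++ [x]).map G ++ xs.map G) p.1).getD ""] else a) := by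
      rw [hnames]
    rw [hfun] at *
    rw [hstart, ih (pre ++ [x])]
    by_cases hx : F x = M
    · rw [if_pos hx, List.filter_cons_of_pos (by simp [hx])]
      simp
    · rw [if_neg hx, List.filter_cons_of_neg (by simp [hx])]

theorem solution_alt_unfold (table : List String) (languages : List String) (preference : List Int) :
    solution_alt table languages preference =
      (match table with
       | [] => ""
       | t0 :: ts =>
         ((ts.map (fun j => (bScore languages preference j, jobName j))).foldl bestStep
           (bScore languages preference t0, jobName t0)).2) := by
  cases table with
  | nil => rfl
  | cons t0 ts =>
    show (match PySem.List.min2? (t0 :: ts)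
        (fun j => (pvRank (pvPref languages preference) j).1)
        (fun j => (pvRank (pvPref languages preference) j).2) with
      | some j => (PySem.List.pyGet? ((PySem.Str.split? j " ").getD []) 0).getD ""
      | none => "")
      = ((ts.map (fun j => (bScore languages preference j, jobName j))).foldl bestStep
          (bScore languages preference t0, jobName t0)).2
    rw [min2?_head]
    exact congrArg Prod.snd (pair_fold (bScore languages preference) jobName ts t0)

theorem solution_eq (table : List String) (languages : List String) (preference : List Int)
    (hne : table ≠ [])
    (H : ∀ job ∈ table, ∀ l ∈ languages.drop preference.length,
      ¬ l ∈ ((PySem.Str.split? job " ").getD []).tail) :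
    solution table languages preference = solution_alt table languages preference := by
  rw [solution_unfold, solution_alt_unfold]
  have hscore : ∀ j ∈ table, aScore languages preference j = bScore languages preference j := by
    intro j hj
    refine score_eq languages preference j ?_
    intro l hl
    rw [jobTail, PySem.List.slice_from_one]
    exact H j hj l hl
  rw [List.map_congr_left hscore]
  obtain ⟨t0, ts, rfl⟩ : ∃ t0 ts, table = t0 :: ts := by
    cases table with
    | nil => exact absurd rfl hne
    | cons a l => exact ⟨a, l, rfl⟩
  set S := bScore languages preference with hS
  set scores := (t0 :: ts).map S with hscores
  cases hmax : PySem.List.max? scores (fun x => x) with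
  | none =>
    exact absurd ((PySem.List.max?_eq_none_iff _ _).mp hmax) (by simp [hscores])
  | some M =>
  simp only [hmax, Option.getD_some]
  have hfilt := filterLoop jobName S M (t0 :: ts) [] []
  simp only [List.map_nil, List.nil_append, Nat.cast_zero, List.length_nil] at hfilt
  rw [hfilt]
  set filt := ((t0 :: ts).filter (fun j => S j = M)).map jobName with hfiltdef
  -- A's head of sorted filt
  have hMmem : M ∈ scores := PySem.List.max?_mem hmax
  have hMmax : ∀ y ∈ scores, y ≤ M := PySem.List.max?_isMax hmax
  obtain ⟨jM, hjM, hjMe⟩ := List.mem_map.mp hMmem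
  have hfilt_ne : filt ≠ [] := by
    have : jM ∈ (t0 :: ts).filter (fun j => S j = M) :=
      List.mem_filter.mpr ⟨hjM, by simp [hjMe]⟩
    intro h
    rw [hfiltdef, List.map_eq_nil_iff, List.filter_eq_nil_iff] at h
    exact h jM hjM (by simp [hjMe])
  cases hs : PySem.List.sorted filt (fun x => x) false with
  | nil => exact absurd ((PySem.List.sorted_eq_nil_iff _ _ _).mp hs) hfilt_ne
  | cons m rest =>
  rw [PySem.List.pyGet?_zero_cons, Option.getD_some]
  have hmle : ∀ y ∈ filt, m ≤ y := PySem.List.key_head_sorted_le _ _ hs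
  have hmmem : m ∈ filt := (PySem.List.mem_sorted _ _ _ _).mp (hs ▸ List.mem_cons_self)
  -- B's running minimum, viewed as bestStep over (score, name) pairs
  set p0 := (S t0, jobName t0) with hp0
  set ps := ts.map (fun j => (S j, jobName j)) with hps
  show _ = (ps.foldl bestStep p0).2
  obtain ⟨hrmem, hrle, hrmax, hrtie, hrties⟩ := bestStep_spec ps p0
  set r := ps.foldl bestStep p0 with hr
  have hrpairs : r ∈ (t0 :: ts).map (fun j => (S j, jobName j)) := by
    rcases hrmem with h | h
    · rw [h, hp0]; exact List.mem_cons_self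
    · exact List.mem_cons_of_mem _ h
  obtain ⟨jr, hjr, hjre⟩ := List.mem_map.mp hrpairs
  have hallpairs : ∀ q ∈ (t0 :: ts).map (fun j => (S j, jobName j)), q.1 ≤ r.1 := by
    intro q hq
    rcases List.mem_cons.mp hq with rfl | hq
    · exact hrle
    · exact hrmax q hq
  have hr1 : r.1 = M := by
    have h1 : r.1 ≤ M := by
      have : r.1 ∈ scores := by
        rw [hscores, ← hjre]
        exact List.mem_map.mpr ⟨jr, hjr, rfl⟩
      exact hMmax _ this
    have h2 : M ≤ r.1 := by
      have := hallpairs (S jM, jobName jM) (List.mem_map.mpr ⟨jM, hjM, rfl⟩)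
      simpa [hjMe] using this
    omega
  have hr2filt : r.2 ∈ filt := by
    rw [hfiltdef]
    refine List.mem_map.mpr ⟨jr, List.mem_filter.mpr ⟨hjr, ?_⟩, by rw [← hjre]⟩
    simp only [decide_eq_true_eq]
    rw [show S jr = r.1 from by rw [← hjre], hr1]
  have hrmin : ∀ y ∈ filt, r.2 ≤ y := by
    intro y hy
    obtain ⟨jy, hjy, hjye⟩ := List.mem_map.mp hy
    have hjy' := List.mem_filter.mp hjy
    have hSy : S jy = M := by simpa using hjy'.2
    have hq : (S jy, jobName jy) ∈ (t0 :: ts).map (fun j => (S j, jobName j)) :=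
      List.mem_map.mpr ⟨jy, hjy'.1, rfl⟩
    have heq : r.1 = (S jy, jobName jy).1 := by simp [hSy, hr1]
    rcases List.mem_cons.mp hq with he | he
    · have he' : (S jy, jobName jy) = p0 := by
        rw [hp0]; exact he.trans rfl
      have h2 := hrtie (by rw [heq, he'])
      rw [← he'] at h2
      simpa [← hjye] using h2
    · rw [← hjye]
      exact hrties _ he heq
  exact le_antisymm (hmle _ hr2filt) (hrmin _ hmmem)

-- ===== VERDICT (by name: the statement is the Claim_ definition above) =====
theorem solution_spec : Claim_equal_solution := by
  intro table languages preference _ hpre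
  exact solution_eq table languages preference hpre.1 hpre.2
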